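-- pv_equiv track=rewrite | github.com/alentoghostflame/StupidAlentoBot | eve_module/market/pricecheck.py | get_autocomplete_items
-- ===== SOURCE A (Python) =====
-- from typing import Dict, List, Tuple, Optional
--
-- MAX_AUTOCOMPLETE: int = 20
--
-- def get_autocomplete_items(auto_complete_cache: Dict[str, Optional[List[int]]], item_dict: Dict[str, int],
--                            item_name: str) -> List[int]:
--     if item_name.lower() not in auto_complete_cache:
--         output_list = list()
--         for key_name in item_dict:
--             split_key_name = key_name.lower().split(" ")
--             for i in range(len(split_key_name)):
--                 if " ".join(split_key_name[-i - 1::]).startswith(item_name):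
--                     output_list.append(item_dict[key_name])
--                     break
--             if len(output_list) > MAX_AUTOCOMPLETE:
--                 break
--
--         auto_complete_cache[item_name.lower()] = output_list
--
--     return auto_complete_cache[item_name.lower()]
-- ===== SOURCE B (Python) =====
-- MAX_AUTOCOMPLETE: int = 20
--
--
-- def _prefix_of_join(name, words):
--     """True iff name is a prefix of " ".join(words), checked word by word (no join is built)."""
--     if not words:
--         return name == ""
--     w = words[0]
--     if len(name) <= len(w):
--         return w.startswith(name)
--     if not name.startswith(w):
--         return False
--     rest = words[1:]
--     if not rest:
--         return False
--     if name[len(w)] != " ":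
--         return False
--     return _prefix_of_join(name[len(w) + 1:], rest)
--
--
-- def _suffix_match(name, words):
--     """True iff some whole-word suffix of words joins to a string starting with name."""
--     while words:
--         if _prefix_of_join(name, words):
--             return True
--         words = words[1:]
--     return False
--
--
-- def get_autocomplete_items(auto_complete_cache, item_dict, item_name):
--     cache_key = item_name.lower()
--     if cache_key not in auto_complete_cache:
--         output_list = []
--         for key_name in item_dict:
--             if _suffix_match(item_name, key_name.lower().split(" ")):
--                 output_list.append(item_dict[key_name])
--                 if len(output_list) > MAX_AUTOCOMPLETE:
--                     break
--         auto_complete_cache[cache_key] = output_list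
--     return auto_complete_cache[cache_key]
-- ===== Notes on version B (the rewrite author's own statement) =====
-- stated objective: alternative
-- what changed: A tests each whole-word suffix of a key by splitting, negative-slicing and re-joining it into a fresh string before a startswith; B walks the split word list once per candidate suffix and checks the query against the words in place (word-by-word prefix check), never materialising a joined string.
-- outside the precondition, e.g. on get_autocomplete_items({'tri': None}, {'Tritanium': 34}, 'tri'): A returns None, B returns None
import Mathlib
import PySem

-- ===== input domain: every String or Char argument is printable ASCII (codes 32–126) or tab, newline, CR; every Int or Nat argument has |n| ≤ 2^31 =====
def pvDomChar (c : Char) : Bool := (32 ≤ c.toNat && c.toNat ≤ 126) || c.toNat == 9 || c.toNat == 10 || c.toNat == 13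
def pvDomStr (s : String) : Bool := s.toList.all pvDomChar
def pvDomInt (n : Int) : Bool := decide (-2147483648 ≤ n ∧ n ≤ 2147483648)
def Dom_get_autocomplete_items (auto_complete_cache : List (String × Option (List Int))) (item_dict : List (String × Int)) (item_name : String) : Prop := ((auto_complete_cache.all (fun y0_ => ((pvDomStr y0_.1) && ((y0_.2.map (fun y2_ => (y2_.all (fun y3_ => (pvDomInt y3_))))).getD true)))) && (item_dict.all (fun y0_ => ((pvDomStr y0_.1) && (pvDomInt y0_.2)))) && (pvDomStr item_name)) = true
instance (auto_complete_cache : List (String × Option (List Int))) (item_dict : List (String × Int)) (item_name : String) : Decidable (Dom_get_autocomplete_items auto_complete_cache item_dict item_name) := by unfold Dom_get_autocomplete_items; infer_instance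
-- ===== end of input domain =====

-- B replaces A's per-key suffix enumeration (split, negative-slice, re-join, startswith for every i)
-- by a direct word-by-word prefix check on the split list that never materialises a joined string.
-- A mutates auto_complete_cache in place (so does B); the equivalence proved here is about the RETURN value.

-- ===== PORT A =====
-- inner loop of A over i in range(len(split_key_name)): " ".join(split_key_name[-i-1:]).startswith(item_name)
def innerAnyA (name : List Char) (key : String) : Bool :=
  let ws := PySem.Chars.splitOn (PySem.Chars.lower key.toList) [' ']
  (PySem.List.pyRange 0 (ws.length : Int) 1).any (fun i =>
    PySem.Chars.startswith (PySem.Chars.join [' '] (PySem.List.slice ws (some (-i - 1)) none)) name)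

-- A's outer loop: append on first inner match, break when len(output_list) > MAX_AUTOCOMPLETE (= 20)
def loopA : List String → PySem.Dict String Int → List Char → List Int → List Int
  | [], _, _, out => out
  | k :: rest, d, name, out =>
    let out' := if innerAnyA name k then out ++ [PySem.Dict.getD d k 0] else out
    if 20 < out'.length then out' else loopA rest d name out'

def get_autocomplete_items (auto_complete_cache : List (String × Option (List Int))) (item_dict : List (String × Int)) (item_name : String) : List Int :=
  match PySem.Dict.get? (PySem.Dict.ofList auto_complete_cache) (PySem.Str.lower item_name) with
  | some v => v.getD []   -- cache hit: Python returns the cached value; a cached None is excluded by Pre_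
  | none =>
    let d := PySem.Dict.ofList item_dict
    loopA (PySem.Dict.keys d) d item_name.toList []

-- ===== PORT B =====
-- _prefix_of_join(name, words): name is a prefix of " ".join(words), checked word by word
def prefixOfJoin : List Char → List (List Char) → Bool
  | name, [] => name.isEmpty
  | name, w :: rest =>
    if name.length ≤ w.length then PySem.Chars.startswith w name
    else if PySem.Chars.startswith name w = false then false
    else match rest with
      | [] => false
      | _ :: _ =>
        if PySem.List.pyGet? name ((w.length : Int)) ≠ some ' ' then false
        else prefixOfJoin (PySem.List.slice name (some ((w.length : Int) + 1)) none) rest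

-- _suffix_match(name, words): while words: if _prefix_of_join(...): True; words = words[1:]
def suffixMatch : List Char → List (List Char) → Bool
  | _, [] => false
  | name, w :: rest => prefixOfJoin name (w :: rest) || suffixMatch name rest

def loopB : List String → PySem.Dict String Int → List Char → List Int → List Int
  | [], _, _, out => out
  | k :: rest, d, name, out =>
    if suffixMatch name (PySem.Chars.splitOn (PySem.Chars.lower k.toList) [' ']) then
      (let out' := out ++ [PySem.Dict.getD d k 0]
       if 20 < out'.length then out' else loopB rest d name out')
    else loopB rest d name out

def get_autocomplete_items_alt (auto_complete_cache : List (String × Option (List Int))) (item_dict : List (String × Int)) (item_name : String) : List Int :=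
  match PySem.Dict.get? (PySem.Dict.ofList auto_complete_cache) (PySem.Str.lower item_name) with
  | some v => v.getD []   -- cache hit (a cached None is excluded by Pre_)
  | none =>
    let d := PySem.Dict.ofList item_dict
    loopB (PySem.Dict.keys d) d item_name.toList []

-- ===== PRECONDITION & SPEC =====
-- Pre_ excludes exactly the cache hits whose stored value is None: there Python A returns None,
-- which is not a value of the declared return type List[int].
def Pre_get_autocomplete_items (auto_complete_cache : List (String × Option (List Int))) (item_dict : List (String × Int)) (item_name : String) : Prop :=
  PySem.Dict.get? (PySem.Dict.ofList auto_complete_cache) (PySem.Str.lower item_name) ≠ some none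

instance (auto_complete_cache : List (String × Option (List Int))) (item_dict : List (String × Int)) (item_name : String) : Decidable (Pre_get_autocomplete_items auto_complete_cache item_dict item_name) := by unfold Pre_get_autocomplete_items; infer_instance

def pvWitness_get_autocomplete_items : (List (String × Option (List Int))) × (List (String × Int)) × String :=
  ([("ore", some [1, 2])], [("Tritanium", 34), ("Pyerite", 35)], "tri")

def Spec_get_autocomplete_items (auto_complete_cache : List (String × Option (List Int))) (item_dict : List (String × Int)) (item_name : String) (out : List Int) : Prop := out = get_autocomplete_items_alt auto_complete_cache item_dict item_name
instance (auto_complete_cache : List (String × Option (List Int))) (item_dict : List (String × Int)) (item_name : String) (out : List Int) : Decidable (Spec_get_autocomplete_items auto_complete_cache item_dict item_name out) := by unfold Spec_get_autocomplete_items; infer_instance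

-- ===== CLAIM (what is proved, stated in full; the proofs are below) =====
def Claim_equal_get_autocomplete_items : Prop := ∀ (auto_complete_cache : List (String × Option (List Int))) (item_dict : List (String × Int)) (item_name : String), Dom_get_autocomplete_items auto_complete_cache item_dict item_name → Pre_get_autocomplete_items auto_complete_cache item_dict item_name → Spec_get_autocomplete_items auto_complete_cache item_dict item_name (get_autocomplete_items auto_complete_cache item_dict item_name)

-- ===== LEMMAS AND PROOFS =====

-- the first word is a prefix of the space-join
theorem join_cons_prefix (w : List Char) (rest : List (List Char)) :
    w <+: PySem.Chars.join [' '] (w :: rest) := by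
  cases rest with
  | nil => rw [PySem.Chars.join_singleton]
  | cons r rs =>
    rw [PySem.Chars.join_cons_cons]
    exact (List.prefix_append w [' ']).trans (List.prefix_append _ _)

-- B's word-by-word check decides "name is a prefix of the space-join"
theorem prefixOfJoin_iff (ws : List (List Char)) (cs : List Char) :
    prefixOfJoin cs ws = true ↔ cs <+: PySem.Chars.join [' '] ws := by
  induction ws generalizing cs with
  | nil =>
    simp [prefixOfJoin, PySem.Chars.join_nil, List.prefix_nil, List.isEmpty_iff]
  | cons w rest ih =>
    simp only [prefixOfJoin]
    by_cases h1 : cs.length ≤ w.length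
    · rw [if_pos h1, PySem.Chars.startswith_iff]
      constructor
      · exact fun h => h.trans (join_cons_prefix w rest)
      · exact fun h => List.prefix_of_prefix_length_le h (join_cons_prefix w rest) h1
    · rw [if_neg h1]
      rw [not_le] at h1
      by_cases h2 : PySem.Chars.startswith cs w = true
      · rw [if_neg (by simp [h2])]
        obtain ⟨cs', rfl⟩ := (PySem.Chars.startswith_iff _ _).mp h2
        cases rest with
        | nil =>
          rw [PySem.Chars.join_singleton]
          simp only [Bool.false_eq_true, false_iff]
          intro h
          have := h.length_le
          simp only [List.length_append] at this h1
          omega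
        | cons r rs =>
          cases cs' with
          | nil => simp at h1
          | cons c cs'' =>
            have hget : PySem.List.pyGet? (w ++ c :: cs'') ((w.length : Int)) = some c := by
              simp [pysem]
            have hslice : PySem.List.slice (w ++ c :: cs'') (some ((w.length : Int) + 1)) none
                = cs'' := by
              have hcast : ((w.length : Int) + 1) = (((w.length + 1 : Nat)) : Int) := by push_cast; ring
              rw [hcast, PySem.List.slice_from_natCast, List.drop_length_add_append]
              simp
            have hjoin : PySem.Chars.join [' '] (w :: r :: rs)
                = w ++ (' ' :: PySem.Chars.join [' '] (r :: rs)) := by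
              rw [PySem.Chars.join_cons_cons]; simp
            rw [hget, hslice, hjoin, List.prefix_append_right_inj, List.cons_prefix_cons]
            by_cases hc : c = ' '
            · subst hc; simp [ih]
            · simp [hc]
      · have h2' : PySem.Chars.startswith cs w = false := by simpa using h2
        rw [h2', if_pos rfl]
        simp only [Bool.false_eq_true, false_iff]
        intro hpre
        exact h2 ((PySem.Chars.startswith_iff _ _).mpr
          (List.prefix_of_prefix_length_le (join_cons_prefix w rest) hpre (by omega)))

-- B's suffix scan decides the existence of a matching whole-word suffix
theorem suffixMatch_iff (ws : List (List Char)) (cs : List Char) :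
    suffixMatch cs ws = true ↔ ∃ j < ws.length, cs <+: PySem.Chars.join [' '] (ws.drop j) := by
  induction ws with
  | nil => simp [suffixMatch]
  | cons w rest ih =>
    simp only [suffixMatch]
    rw [Bool.or_eq_true, prefixOfJoin_iff, ih]
    constructor
    · rintro (h | ⟨j, hj, h⟩)
      · exact ⟨0, by simp, h⟩
      · exact ⟨j + 1, by simpa using hj, by simpa using h⟩
    · rintro ⟨j, hj, h⟩
      cases j with
      | zero => exact Or.inl (by simpa using h)
      | succ j => exact Or.inr ⟨j, by simpa using hj, by simpa using h⟩

-- A's inner loop decides the same existence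
theorem innerAnyA_iff (name : List Char) (key : String) :
    innerAnyA name key = true ↔
      ∃ j < (PySem.Chars.splitOn (PySem.Chars.lower key.toList) [' ']).length,
        name <+: PySem.Chars.join [' ']
          ((PySem.Chars.splitOn (PySem.Chars.lower key.toList) [' ']).drop j) := by
  have main : ∀ ws : List (List Char),
      ((PySem.List.pyRange 0 (ws.length : Int) 1).any (fun i =>
        PySem.Chars.startswith (PySem.Chars.join [' ']
          (PySem.List.slice ws (some (-i - 1)) none)) name)) = true
      ↔ ∃ j < ws.length, name <+: PySem.Chars.join [' '] (ws.drop j) := by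
    intro ws
    rw [List.any_eq_true]
    constructor
    · rintro ⟨i, hmem, hpred⟩
      rw [PySem.List.mem_pyRange_one] at hmem
      obtain ⟨k, rfl⟩ := Int.eq_ofNat_of_zero_le hmem.1
      have hk : k < ws.length := by exact_mod_cast hmem.2
      have hslice : PySem.List.slice ws (some (-(k : Int) - 1)) none
          = ws.drop (ws.length - (k + 1)) := by
        rw [show (-(k : Int) - 1) = -(((k + 1 : Nat)) : Int) by push_cast; ring,
          PySem.List.slice_from_neg_natCast _ _ (Nat.succ_pos k)]
      rw [hslice, PySem.Chars.startswith_iff] at hpred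
      exact ⟨ws.length - (k + 1), by omega, hpred⟩
    · rintro ⟨j, hj, hpre⟩
      refine ⟨((ws.length - 1 - j : Nat) : Int), ?_, ?_⟩
      · rw [PySem.List.mem_pyRange_one]
        exact ⟨Int.natCast_nonneg _, by exact_mod_cast (show ws.length - 1 - j < ws.length by omega)⟩
      · have hslice : PySem.List.slice ws (some (-(((ws.length - 1 - j : Nat)) : Int) - 1)) none
            = ws.drop j := by
          rw [show (-(((ws.length - 1 - j : Nat)) : Int) - 1) = -(((ws.length - j : Nat)) : Int) by
                rw [show ws.length - j = (ws.length - 1 - j) + 1 by omega]; push_cast; ring,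
            PySem.List.slice_from_neg_natCast _ _ (by omega),
            show ws.length - (ws.length - j) = j by omega]
        rw [hslice, PySem.Chars.startswith_iff]
        exact hpre
  simpa only [innerAnyA] using main (PySem.Chars.splitOn (PySem.Chars.lower key.toList) [' '])

theorem innerAnyA_eq_suffixMatch (name : List Char) (key : String) :
    innerAnyA name key = suffixMatch name (PySem.Chars.splitOn (PySem.Chars.lower key.toList) [' ']) := by
  rw [Bool.eq_iff_iff, innerAnyA_iff, suffixMatch_iff]

theorem loopA_eq_loopB (ks : List String) (d : PySem.Dict String Int) (name : List Char)
    (out : List Int) (h : out.length ≤ 20) : loopA ks d name out = loopB ks d name out := by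
  induction ks generalizing out with
  | nil => rfl
  | cons k rest ih =>
    simp only [loopA, loopB, innerAnyA_eq_suffixMatch name k]
    by_cases hm : suffixMatch name (PySem.Chars.splitOn (PySem.Chars.lower k.toList) [' ']) = true
    · simp only [hm, if_true]
      by_cases hl : 20 < (out ++ [PySem.Dict.getD d k 0]).length
      · rw [if_pos hl, if_pos hl]
      · rw [if_neg hl, if_neg hl]
        exact ih _ (by simp only [List.length_append, List.length_cons, List.length_nil] at hl ⊢; omega)
    · simp only [Bool.not_eq_true] at hm
      simp only [hm, Bool.false_eq_true, if_false]
      have : ¬ 20 < out.length := by omega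
      simp only [this, if_false]
      exact ih _ h

-- ===== VERDICT (by name: the statement is the Claim_ definition above) =====
theorem get_autocomplete_items_spec : Claim_equal_get_autocomplete_items := by
  intro cache d name _ _
  unfold Spec_get_autocomplete_items get_autocomplete_items get_autocomplete_items_alt
  cases PySem.Dict.get? (PySem.Dict.ofList cache) (PySem.Str.lower name) with
  | some v => rfl
  | none => exact loopA_eq_loopB _ _ _ [] (by simp)
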